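-- pv_equiv track=rewrite | github.com/yutaOKKOTSU00/python-for-EveryOne | graph_theories/graph_propertises.py | Application_bijective
-- ===== SOURCE A (Python) =====
-- def Application(matrice, sommets):  # exactement un 1 par ligne
--     T = 1
--
--     for i in range(sommets):
--         ligne = 0
--         for j in range(sommets):
--             ligne += matrice[i][j]
--         if ligne != 1:
--             T = 0
--
--     return T
--
-- def Application_bijective(matrice, sommets):  # exactement un 1 par ligne et par colonne
--     T = 1
--
--     for i in range(sommets):
--         colone = 0
--         for j in range(sommets):
--             colone += matrice[j][i]
--         if colone != 1:
--             T = 0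
--     if not(Application(matrice, sommets)):
--         T = 0
--
--     return T
-- ===== SOURCE B (Python) =====
-- def Application_bijective(matrice, sommets):  # exactement un 1 par ligne et par colonne
--     rowsum = [0] * sommets
--     colsum = [0] * sommets
--     for i in range(sommets):
--         for j in range(sommets):
--             v = matrice[i][j]
--             rowsum[i] += v
--             colsum[j] += v
--     return int(all(x == 1 for x in rowsum) and all(x == 1 for x in colsum))
-- ===== Notes on version B (the rewrite author's own statement) =====
-- stated objective: alternative
-- what changed: One single sweep over the matrix accumulating rowsum and colsum arrays simultaneously, then a final all()-check, instead of A's two separate flag-loop passes (its own column pass plus a delegated row pass via Application).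
import Mathlib
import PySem

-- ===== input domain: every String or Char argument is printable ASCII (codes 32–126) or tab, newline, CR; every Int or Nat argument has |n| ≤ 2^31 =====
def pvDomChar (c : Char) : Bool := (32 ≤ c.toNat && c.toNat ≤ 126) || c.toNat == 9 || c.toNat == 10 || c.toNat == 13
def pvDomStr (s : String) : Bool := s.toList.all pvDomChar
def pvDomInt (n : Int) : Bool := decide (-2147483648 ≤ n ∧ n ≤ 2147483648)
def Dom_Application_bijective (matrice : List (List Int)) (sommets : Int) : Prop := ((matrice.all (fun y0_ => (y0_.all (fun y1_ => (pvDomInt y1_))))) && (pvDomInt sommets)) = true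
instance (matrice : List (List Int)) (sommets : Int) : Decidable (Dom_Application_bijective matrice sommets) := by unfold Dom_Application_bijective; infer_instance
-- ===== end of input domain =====

-- B makes one sweep over the matrix accumulating rowsum/colsum arrays and checks them once,
-- instead of A's two separate flag-loop passes (alternative decomposition, same asymptotic cost).

-- ===== PORT A =====
-- matrice[i][j]; Pre_ guarantees both indexings are in range (Python raises IndexError outside)
def pvGetA (m : List (List Int)) (i j : Int) : Int :=
  (PySem.List.pyGet? ((PySem.List.pyGet? m i).getD []) j).getD 0

-- helper `Application` of A, line for line
def pyApplication (matrice : List (List Int)) (sommets : Int) : Int :=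
  (PySem.List.pyRange 0 sommets 1).foldl
    (fun T i =>
      let ligne := (PySem.List.pyRange 0 sommets 1).foldl
        (fun acc j => acc + pvGetA matrice i j) 0
      if ligne ≠ 1 then 0 else T) 1

def Application_bijective (matrice : List (List Int)) (sommets : Int) : Int :=
  let T := (PySem.List.pyRange 0 sommets 1).foldl
    (fun T i =>
      let colone := (PySem.List.pyRange 0 sommets 1).foldl
        (fun acc j => acc + pvGetA matrice j i) 0
      if colone ≠ 1 then 0 else T) 1
  if pyApplication matrice sommets = 0 then 0 else T

-- ===== PORT B =====
def Application_bijective_alt (matrice : List (List Int)) (sommets : Int) : Int :=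
  let init : List Int × List Int :=
    (List.replicate sommets.toNat 0, List.replicate sommets.toNat 0)   -- [0]*sommets twice
  let st := (PySem.List.pyRange 0 sommets 1).foldl
    (fun st i =>
      (PySem.List.pyRange 0 sommets 1).foldl
        (fun (st : List Int × List Int) j =>
          let v := pvGetA matrice i j
          (st.1.set i.toNat (st.1.getD i.toNat 0 + v),
           st.2.set j.toNat (st.2.getD j.toNat 0 + v))) st) init
  if st.1.all (fun x => x == 1) && st.2.all (fun x => x == 1) then 1 else 0

-- ===== PRECONDITION & SPEC =====
-- Pre_ excludes exactly the inputs where the Python A raises IndexError: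
-- matrices with fewer than `sommets` rows, or a row among the first `sommets` with fewer than `sommets` entries.
def Pre_Application_bijective (matrice : List (List Int)) (sommets : Int) : Prop :=
  sommets ≤ (matrice.length : Int) ∧
  ∀ r ∈ matrice.take sommets.toNat, sommets ≤ (r.length : Int)
instance (matrice : List (List Int)) (sommets : Int) : Decidable (Pre_Application_bijective matrice sommets) := by unfold Pre_Application_bijective; infer_instance

def pvWitness_Application_bijective : List (List Int) × Int := ([[0, 1], [1, 0]], 2)

def Spec_Application_bijective (matrice : List (List Int)) (sommets : Int) (out : Int) : Prop := out = Application_bijective_alt matrice sommets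
instance (matrice : List (List Int)) (sommets : Int) (out : Int) : Decidable (Spec_Application_bijective matrice sommets out) := by unfold Spec_Application_bijective; infer_instance

-- ===== CLAIM (what is proved, stated in full; the proofs are below) =====
def Claim_equal_Application_bijective : Prop := ∀ (matrice : List (List Int)) (sommets : Int), Dom_Application_bijective matrice sommets → Pre_Application_bijective matrice sommets → Spec_Application_bijective matrice sommets (Application_bijective matrice sommets)

-- ===== LEMMAS AND PROOFS =====

-- entry (i,j) as both ports read it, with Nat indices
def pvG (m : List (List Int)) (i j : Nat) : Int := pvGetA m (i : Int) (j : Int)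
def pvRowS (m : List (List Int)) (n i : Nat) : Int := ((List.range n).map (fun j => pvG m i j)).sum
def pvColS (m : List (List Int)) (n j : Nat) : Int := ((List.range n).map (fun i => pvG m i j)).sum
def pvPairs (n : Nat) : List (Nat × Nat) := (List.range n).flatMap (fun i => (List.range n).map (fun j => (i, j)))
def pvStepR (m : List (List Int)) (a : List Int) (p : Nat × Nat) : List Int := a.set p.1 (a.getD p.1 0 + pvG m p.1 p.2)
def pvStepC (m : List (List Int)) (a : List Int) (p : Nat × Nat) : List Int := a.set p.2 (a.getD p.2 0 + pvG m p.1 p.2)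

lemma pvRange_eq (s : Int) :
    PySem.List.pyRange 0 s 1 = (List.range s.toNat).map (fun (k : Nat) => (k : Int)) := by
  rw [PySem.List.pyRange_one]; simp

lemma pvRowS_def (m : List (List Int)) (n i : Nat) :
    ((List.range n).map (fun (j : Nat) => pvGetA m (i : Int) (j : Int))).sum = pvRowS m n i := rfl

lemma pvColS_def (m : List (List Int)) (n i : Nat) :
    ((List.range n).map (fun (j : Nat) => pvGetA m (j : Int) (i : Int))).sum = pvColS m n i := rfl

lemma pvFlagFold {α} (l : List α) (p : α → Prop) [DecidablePred p] (T : Int) :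
    l.foldl (fun T i => if p i then 0 else T) T = if ∀ i ∈ l, ¬ p i then T else 0 := by
  induction l generalizing T with
  | nil => simp
  | cons a l ih =>
    simp only [List.foldl_cons, List.mem_cons]
    by_cases h : p a
    · rw [ih]; simp [h]
    · rw [ih]; simp [h]

lemma pvSumFold {α} (l : List α) (f : α → Int) (c : Int) :
    l.foldl (fun acc j => acc + f j) c = c + (l.map f).sum := by
  induction l generalizing c with
  | nil => simp
  | cons a l ih => simp [ih]; ring

-- the inner j-loop of B updates the two arrays independently
lemma pvInner (m : List (List Int)) (i : Nat) (J : List Nat) (st : List Int × List Int) :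
    J.foldl (fun st j => (st.1.set i (st.1.getD i 0 + pvGetA m (i : Int) (j : Int)),
                          st.2.set j (st.2.getD j 0 + pvGetA m (i : Int) (j : Int)))) st
      = ((J.map (fun j => (i, j))).foldl (pvStepR m) st.1,
         (J.map (fun j => (i, j))).foldl (pvStepC m) st.2) := by
  induction J generalizing st with
  | nil => simp
  | cons j J ih => rw [List.foldl_cons, ih]; simp [pvStepR, pvStepC, pvG]

-- the whole double loop of B, flattened to two independent folds over the pair list
lemma pvOuter (m : List (List Int)) (L J : List Nat) (init : List Int × List Int) :
    L.foldl (fun st i => J.foldl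
        (fun st j => (st.1.set i (st.1.getD i 0 + pvGetA m (i : Int) (j : Int)),
                      st.2.set j (st.2.getD j 0 + pvGetA m (i : Int) (j : Int)))) st) init
      = ((L.flatMap (fun i => J.map (fun j => (i, j)))).foldl (pvStepR m) init.1,
         (L.flatMap (fun i => J.map (fun j => (i, j)))).foldl (pvStepC m) init.2) := by
  induction L generalizing init with
  | nil => simp
  | cons i L ih =>
    rw [List.foldl_cons, pvInner, ih]
    simp [List.foldl_append]

lemma pvOuterRange (m : List (List Int)) (n : Nat) (init : List Int × List Int) :
    (List.range n).foldl (fun st i => (List.range n).foldl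
        (fun st j => (st.1.set i (st.1.getD i 0 + pvGetA m (i : Int) (j : Int)),
                      st.2.set j (st.2.getD j 0 + pvGetA m (i : Int) (j : Int)))) st) init
      = ((pvPairs n).foldl (pvStepR m) init.1, (pvPairs n).foldl (pvStepC m) init.2) := by
  rw [pvPairs]; exact pvOuter m _ _ init

lemma pvAccLen {π} (P : List π) (key : π → Nat) (val : π → Int) (a : List Int) :
    (P.foldl (fun a p => a.set (key p) (a.getD (key p) 0 + val p)) a).length = a.length := by
  induction P generalizing a with
  | nil => rfl
  | cons p P ih => simp only [List.foldl_cons]; rw [ih]; simp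

lemma pvAccGetD {π} (P : List π) (key : π → Nat) (val : π → Int) (a : List Int) (t : Nat)
    (hk : ∀ p ∈ P, key p < a.length) :
    (P.foldl (fun a p => a.set (key p) (a.getD (key p) 0 + val p)) a).getD t 0
      = a.getD t 0 + ((P.filter (fun p => key p == t)).map val).sum := by
  induction P generalizing a with
  | nil => simp
  | cons p P ih =>
    simp only [List.foldl_cons, List.filter_cons]
    rw [ih]
    · by_cases h : key p = t
      · subst h
        have hlt : key p < a.length := hk p (by simp)
        simp [List.getD_eq_getElem?_getD, hlt]
        ring
      · simp [List.getD_eq_getElem?_getD, h]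
    · intro q hq; simpa using hk q (List.mem_cons_of_mem _ hq)

lemma pvFilterFst (n i t : Nat) :
    (((List.range n).map (fun j => (i, j))).filter (fun p => p.1 == t)) =
      if i = t then (List.range n).map (fun j => (i, j)) else [] := by
  rw [List.filter_map]
  by_cases h : i = t
  · subst h; simp [Function.comp_def]
  · simp [Function.comp_def, h]

lemma pvFilterSnd (n i t : Nat) (ht : t < n) :
    (((List.range n).map (fun j => (i, j))).filter (fun p => p.2 == t)) = [(i, t)] := by
  rw [List.filter_map]
  have h1 : (List.range n).filter (fun j => j == t) = [t] := by
    rw [List.filter_beq]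
    simp [List.count_range, ht]
  simp [Function.comp_def, h1]

lemma pvFlatMapSingle {α} (n t : Nat) (X : List α) (ht : t < n) :
    (List.range n).flatMap (fun i => if i = t then X else []) = X := by
  induction n with
  | zero => omega
  | succ n ih =>
    rw [List.range_succ, List.flatMap_append]
    by_cases h : t < n
    · rw [ih h]
      have hn : ¬ (n = t) := by omega
      simp [hn]
    · have htn : t = n := by omega
      subst htn
      have h0 : (List.range t).flatMap (fun i => if i = t then X else []) = [] :=
        List.flatMap_eq_nil_iff.mpr (by intro i hi; simp at hi; simp [Nat.ne_of_lt hi])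
      rw [h0]; simp

lemma pvAllIff (l : List Int) (F : Nat → Int) (n : Nat) (hlen : l.length = n)
    (hF : ∀ t, t < n → l.getD t 0 = F t) :
    (l.all (fun x => x == 1)) = true ↔ ∀ t, t < n → F t = 1 := by
  simp only [List.all_eq_true, beq_iff_eq]
  constructor
  · intro h t ht
    rw [← hF t ht, List.getD_eq_getElem?_getD]
    have h2 : t < l.length := by omega
    rw [List.getElem?_eq_getElem h2]
    simpa using h l[t] (List.getElem_mem _)
  · intro h x hx
    obtain ⟨k, hk, rfl⟩ := List.mem_iff_getElem.mp hx
    have hk2 := h k (by omega)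
    rw [← hF k (by omega), List.getD_eq_getElem?_getD, List.getElem?_eq_getElem hk] at hk2
    exact hk2

lemma pyApplication_eq (m : List (List Int)) (s : Int) :
    pyApplication m s =
      if ∀ i, i < s.toNat → pvRowS m s.toNat i = 1 then 1 else 0 := by
  unfold pyApplication
  simp only [pvRange_eq, List.foldl_map]
  simp only [pvSumFold, zero_add, pvRowS_def]
  rw [pvFlagFold (List.range s.toNat) (fun k => ¬ pvRowS m s.toNat k = 1)]
  simp only [not_not, List.mem_range]

lemma A_eq (m : List (List Int)) (s : Int) :
    Application_bijective m s =
      if (∀ i, i < s.toNat → pvColS m s.toNat i = 1) ∧ (∀ i, i < s.toNat → pvRowS m s.toNat i = 1)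
      then 1 else 0 := by
  unfold Application_bijective
  rw [pyApplication_eq]
  simp only [pvRange_eq, List.foldl_map]
  simp only [pvSumFold, zero_add, pvColS_def]
  rw [pvFlagFold (List.range s.toNat) (fun k => ¬ pvColS m s.toNat k = 1)]
  simp only [not_not, List.mem_range]
  by_cases hr : ∀ i, i < s.toNat → pvRowS m s.toNat i = 1
  · rw [if_pos hr, if_neg (by norm_num : ¬ ((1:Int) = 0))]
    by_cases hc : ∀ i, i < s.toNat → pvColS m s.toNat i = 1
    · rw [if_pos hc, if_pos ⟨hc, hr⟩]
    · rw [if_neg hc, if_neg (fun h => hc h.1)]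
  · rw [if_neg hr, if_pos rfl, if_neg (fun h => hr h.2)]

lemma pvPairs_fst_lt (n : Nat) : ∀ p ∈ pvPairs n, p.1 < n := by
  intro p hp
  simp [pvPairs] at hp
  obtain ⟨i, hi, j, hj, rfl⟩ := hp
  exact hi

lemma pvPairs_snd_lt (n : Nat) : ∀ p ∈ pvPairs n, p.2 < n := by
  intro p hp
  simp [pvPairs] at hp
  obtain ⟨i, hi, j, hj, rfl⟩ := hp
  exact hj

lemma pvPairs_filter_fst (m : List (List Int)) (n t : Nat) (ht : t < n) :
    (((pvPairs n).filter (fun p => p.1 == t)).map (fun p => pvG m p.1 p.2)).sum = pvRowS m n t := by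
  rw [pvPairs, List.filter_flatMap]
  simp only [pvFilterFst]
  have h2 : ((List.range n).flatMap fun i =>
      if i = t then (List.range n).map (fun j => (i, j)) else []) =
      (List.range n).map (fun j => (t, j)) := by
    have h3 := pvFlatMapSingle n t ((List.range n).map (fun j => (t, j))) ht
    rw [← h3]
    congr 1
    funext i
    by_cases h : i = t <;> simp [h]
  rw [h2, List.map_map]
  rfl

lemma pvPairs_filter_snd (m : List (List Int)) (n t : Nat) (ht : t < n) :
    (((pvPairs n).filter (fun p => p.2 == t)).map (fun p => pvG m p.1 p.2)).sum = pvColS m n t := by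
  rw [pvPairs, List.filter_flatMap]
  have h2 : ((List.range n).flatMap fun i =>
      ((List.range n).map (fun j => (i, j))).filter (fun p => p.2 == t)) =
      (List.range n).map (fun i => (i, t)) := by
    have h1 : ∀ i, (((List.range n).map (fun j => (i, j))).filter (fun p => p.2 == t)) = [(i, t)] :=
      fun i => pvFilterSnd n i t ht
    simp only [h1]
    induction (List.range n) with
    | nil => rfl
    | cons x L ih => simp [ih]
  rw [h2, List.map_map]
  rfl

lemma B_eq (m : List (List Int)) (s : Int) :
    Application_bijective_alt m s =
      if (∀ i, i < s.toNat → pvRowS m s.toNat i = 1) ∧ (∀ i, i < s.toNat → pvColS m s.toNat i = 1)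
      then 1 else 0 := by
  unfold Application_bijective_alt
  simp only [pvRange_eq, List.foldl_map, Int.toNat_natCast]
  rw [pvOuterRange m s.toNat (List.replicate s.toNat 0, List.replicate s.toNat 0)]
  have hrlen : ((pvPairs s.toNat).foldl (pvStepR m) (List.replicate s.toNat 0)).length
      = s.toNat := by rw [show pvStepR m = fun a p => a.set p.1 (a.getD p.1 0 + pvG m p.1 p.2) from rfl, pvAccLen]; simp
  have hclen : ((pvPairs s.toNat).foldl (pvStepC m) (List.replicate s.toNat 0)).length
      = s.toNat := by rw [show pvStepC m = fun a p => a.set p.2 (a.getD p.2 0 + pvG m p.1 p.2) from rfl, pvAccLen]; simp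
  have hrget : ∀ t, t < s.toNat →
      ((pvPairs s.toNat).foldl (pvStepR m) (List.replicate s.toNat 0)).getD t 0
        = pvRowS m s.toNat t := by
    intro t ht
    rw [show pvStepR m = fun a p => a.set p.1 (a.getD p.1 0 + pvG m p.1 p.2) from rfl]
    rw [pvAccGetD (pvPairs s.toNat) (fun p => p.1) (fun p => pvG m p.1 p.2) _ t
        (by simpa using pvPairs_fst_lt s.toNat)]
    rw [pvPairs_filter_fst m s.toNat t ht]
    simp
  have hcget : ∀ t, t < s.toNat →
      ((pvPairs s.toNat).foldl (pvStepC m) (List.replicate s.toNat 0)).getD t 0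
        = pvColS m s.toNat t := by
    intro t ht
    rw [show pvStepC m = fun a p => a.set p.2 (a.getD p.2 0 + pvG m p.1 p.2) from rfl]
    rw [pvAccGetD (pvPairs s.toNat) (fun p => p.2) (fun p => pvG m p.1 p.2) _ t
        (by simpa using pvPairs_snd_lt s.toNat)]
    rw [pvPairs_filter_snd m s.toNat t ht]
    simp
  have hrall := pvAllIff _ (pvRowS m s.toNat) s.toNat hrlen hrget
  have hcall := pvAllIff _ (pvColS m s.toNat) s.toNat hclen hcget
  by_cases hr : ∀ i, i < s.toNat → pvRowS m s.toNat i = 1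
  · by_cases hc : ∀ i, i < s.toNat → pvColS m s.toNat i = 1
    · rw [if_pos (by rw [Bool.and_eq_true]; exact ⟨hrall.mpr hr, hcall.mpr hc⟩), if_pos ⟨hr, hc⟩]
    · rw [if_neg (by rw [Bool.and_eq_true]; rintro ⟨h1, h2⟩; exact hc (hcall.mp h2)),
          if_neg (fun h => hc h.2)]
  · rw [if_neg (by rw [Bool.and_eq_true]; rintro ⟨h1, h2⟩; exact hr (hrall.mp h1)),
        if_neg (fun h => hr h.1)]

-- ===== VERDICT (by name: the statement is the Claim_ definition above) =====
theorem Application_bijective_spec : Claim_equal_Application_bijective := by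
  intro matrice sommets _hdom _hpre
  unfold Spec_Application_bijective
  rw [A_eq, B_eq]
  by_cases hr : ∀ i, i < sommets.toNat → pvRowS matrice sommets.toNat i = 1
  · by_cases hc : ∀ i, i < sommets.toNat → pvColS matrice sommets.toNat i = 1
    · rw [if_pos ⟨hc, hr⟩, if_pos ⟨hr, hc⟩]
    · rw [if_neg (fun h => hc h.1), if_neg (fun h => hc h.2)]
  · rw [if_neg (fun h => hr h.2), if_neg (fun h => hr h.1)]
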